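-- pv_equiv track=rewrite | github.com/joshanashakya/dissertation | workspace/dataset/java-python/GeeksForGeeks/1046/A/2.py | maxPrefix
-- ===== SOURCE A (Python) =====
-- def maxPrefix(s, t) :
--     count = 0
--
--     # Iterating string T.
--     for i in range(0,len(t)) :
--
--         # If end of string S.
--         if (count == len(s)) :
--             break
--
--         # If character match,
--         # increment counter.
--         if (t[i] == s[count]) :
--             count = count + 1
--
--
--     return count
-- ===== SOURCE B (Python) =====
-- def maxPrefix(s, t):
--     pos = 0
--     count = 0
--     for ch in s:
--         idx = t.find(ch, pos)
--         if idx == -1: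
--             break
--         pos = idx + 1
--         count += 1
--     return count
-- ===== Notes on version B (the rewrite author's own statement) =====
-- stated objective: alternative
-- what changed: B loops over the characters of s and jumps forward in t with str.find(ch, pos), instead of A's single scan over the indices of t with a counter into s.
import Mathlib
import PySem

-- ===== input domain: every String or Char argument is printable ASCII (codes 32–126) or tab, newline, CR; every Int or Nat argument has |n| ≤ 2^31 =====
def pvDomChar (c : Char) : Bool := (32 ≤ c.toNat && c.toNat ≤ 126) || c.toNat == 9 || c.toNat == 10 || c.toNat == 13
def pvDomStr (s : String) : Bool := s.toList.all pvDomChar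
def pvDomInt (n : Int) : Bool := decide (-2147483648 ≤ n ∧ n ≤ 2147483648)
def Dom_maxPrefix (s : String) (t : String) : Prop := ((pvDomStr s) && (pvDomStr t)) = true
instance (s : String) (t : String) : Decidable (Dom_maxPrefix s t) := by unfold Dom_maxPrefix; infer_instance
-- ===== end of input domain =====

-- B loops over the characters of s and jumps forward in t with str.find(ch, pos), instead of
-- A's single scan over the indices of t with a counter into s; same value, no speed claim.

-- ===== PORT A =====
-- Literal port of A: fold over range(0, len(t)); Python's `break` at count == len(s) is
-- rendered as the state-preserving branch (once count == len(s) no later step changes it).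
def maxPrefix (s : String) (t : String) : Int :=
  (PySem.List.pyRange 0 (PySem.Str.len t) 1).foldl
    (fun count i =>
      if count = PySem.Str.len s then count
      else if PySem.Str.pyGet? t i = PySem.Str.pyGet? s count then count + 1
      else count)
    0

-- ===== PORT B =====
-- Port of Source B: iterate over the characters of s, pos/count as Int state;
-- `t.find(ch, pos)` is PySem.Str.findFrom; `break` ends the loop over the remaining chars.
def maxPrefixAltGo (t : String) : List Char → Int → Int → Int
  | [], _, count => count
  | ch :: rest, pos, count =>
      let idx := PySem.Str.findFrom t (String.ofList [ch]) pos none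
      if idx = -1 then count
      else maxPrefixAltGo t rest (idx + 1) (count + 1)

def maxPrefix_alt (s : String) (t : String) : Int :=
  maxPrefixAltGo t s.toList 0 0

-- ===== PRECONDITION & SPEC =====
def Spec_maxPrefix (s : String) (t : String) (out : Int) : Prop := out = maxPrefix_alt s t
instance (s : String) (t : String) (out : Int) : Decidable (Spec_maxPrefix s t out) := by unfold Spec_maxPrefix; infer_instance

-- ===== CLAIM (what is proved, stated in full; the proofs are below) =====
def Claim_equal_maxPrefix : Prop := ∀ (s : String) (t : String), Dom_maxPrefix s t → Spec_maxPrefix s t (maxPrefix s t)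

-- ===== LEMMAS AND PROOFS =====

-- Common specification: greedy subsequence-match count.
def pvGreedy : List Char → List Char → Nat
  | [], _ => 0
  | _ :: _, [] => 0
  | a :: ss, c :: ts => if c = a then pvGreedy ss ts + 1 else pvGreedy (a :: ss) ts

theorem pvGreedy_nil_right (ss : List Char) : pvGreedy ss [] = 0 := by
  cases ss <;> rfl

theorem pvGreedy_nil_left (m : List Char) : pvGreedy [] m = 0 := by cases m <;> rfl

theorem pvHead?Drop (l : List Char) (n : Nat) : (l.drop n).head? = l[n]? := by
  rw [List.head?_eq_getElem?, List.getElem?_drop]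
  simp

-- A's fold step, abstracted.
def pvStepA (s t : String) (count i : Int) : Int :=
  if count = PySem.Str.len s then count
  else if PySem.Str.pyGet? t i = PySem.Str.pyGet? s count then count + 1
  else count

theorem pvStepA_full (s t : String) (l : List Int) :
    l.foldl (pvStepA s t) (PySem.Str.len s) = PySem.Str.len s := by
  induction l with
  | nil => rfl
  | cons x xs ih => simpa [pvStepA] using ih

theorem pvFoldA (s t : String) (p k : Nat) (hp : p ≤ t.toList.length)
    (hk : k ≤ s.toList.length) :
    (PySem.List.pyRange (p : Int) (PySem.Str.len t) 1).foldl (pvStepA s t) (k : Int)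
      = (k : Int) + (pvGreedy (s.toList.drop k) (t.toList.drop p) : Int) := by
  obtain ⟨n, hn⟩ : ∃ n, t.toList.length - p = n := ⟨_, rfl⟩
  induction n generalizing p k with
  | zero =>
      have hpl : p = t.toList.length := by omega
      subst hpl
      rw [PySem.List.pyRange_one_eq_nil (by simp)]
      simp only [List.foldl_nil]
      rw [List.drop_eq_nil_of_le (le_refl _), pvGreedy_nil_right]
      simp
  | succ n ih =>
      have hplt : p < t.toList.length := by omega
      rw [PySem.List.pyRange_one_cons (by simp; exact_mod_cast hplt)]
      simp only [List.foldl_cons]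
      by_cases hks : (k : Int) = PySem.Str.len s
      · have hk' : k = s.toList.length := by
          have : (k : Int) = (s.toList.length : Int) := by simpa using hks
          exact_mod_cast this
        rw [show pvStepA s t (k : Int) (p : Int) = (k : Int) from by simp [pvStepA, hks]]
        rw [hks, pvStepA_full, ← hks, hk']
        rw [List.drop_eq_nil_of_le (le_refl _), pvGreedy_nil_left]
        simp
      · have hks' : k ≠ s.toList.length := by
          intro h; apply hks; simp [h]
        have hklt : k < s.toList.length := lt_of_le_of_ne hk hks'
        have hstep : pvStepA s t (k : Int) (p : Int)
            = if t.toList[p] = s.toList[k] then ((k : Int) + 1) else (k : Int) := by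
          simp only [pvStepA]
          rw [if_neg hks, PySem.Str.pyGet?_natCast, PySem.Str.pyGet?_natCast,
            List.getElem?_eq_getElem hplt, List.getElem?_eq_getElem hklt]
          simp
        have hdt : t.toList.drop p = t.toList[p] :: t.toList.drop (p + 1) :=
          List.drop_eq_getElem_cons hplt
        have hds : s.toList.drop k = s.toList[k] :: s.toList.drop (k + 1) :=
          List.drop_eq_getElem_cons hklt
        rw [hstep]
        by_cases heq : t.toList[p] = s.toList[k]
        · rw [if_pos heq]
          have := ih (p + 1) (k + 1) (by omega) (by omega) (by omega)
          push_cast at this ⊢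
          rw [this, hdt, hds]
          simp [pvGreedy, heq]
          ring
        · rw [if_neg heq]
          have := ih (p + 1) k (by omega) hk (by omega)
          push_cast at this ⊢
          rw [this, hdt, hds]
          simp [pvGreedy, heq]

theorem pvNotMem (a : Char) (ss m : List Char) (h : a ∉ m) :
    pvGreedy (a :: ss) m = 0 := by
  induction m with
  | nil => rfl
  | cons c ts ih =>
      simp only [List.mem_cons, not_or] at h
      simp [pvGreedy, Ne.symm h.1, ih h.2]

theorem pvSkip (a : Char) (ss : List Char) (j : Nat) (m : List Char)
    (hmin : ∀ i, i < j → m[i]? ≠ some a) (hj : m[j]? = some a) :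
    pvGreedy (a :: ss) m = 1 + pvGreedy ss (m.drop (j + 1)) := by
  induction j generalizing m with
  | zero =>
      cases m with
      | nil => simp at hj
      | cons c ts =>
          simp at hj
          simp [pvGreedy, hj, Nat.add_comm]
  | succ j ih =>
      cases m with
      | nil => simp at hj
      | cons c ts =>
          have hc : c ≠ a := by
            have := hmin 0 (Nat.succ_pos _)
            simpa using this
          have : pvGreedy (a :: ss) ts = 1 + pvGreedy ss (ts.drop (j + 1)) := by
            refine ih ts (fun i hi => ?_) (by simpa using hj)
            have := hmin (i + 1) (Nat.succ_lt_succ hi)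
            simpa using this
          simpa [pvGreedy, hc] using this

theorem pvSingleton_infix_iff (a : Char) (m : List Char) : [a] <:+: m ↔ a ∈ m := by
  constructor
  · intro h; exact h.sublist.mem (by simp)
  · intro h
    obtain ⟨u, v, rfl⟩ := List.append_of_mem h
    exact ⟨u, v, by simp⟩

theorem pvSingleton_prefix_iff (a : Char) (m : List Char) : [a] <+: m ↔ m.head? = some a := by
  cases m with
  | nil => simp
  | cons c ts =>
      constructor
      · rintro ⟨r, hr⟩; simp at hr; simp [hr.1]
      · intro h; simp at h; exact ⟨ts, by simp [h]⟩

theorem pvGoB (t : String) (ss : List Char) (p k : Nat) (hp : p ≤ t.toList.length) :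
    maxPrefixAltGo t ss (p : Int) (k : Int)
      = (k : Int) + (pvGreedy ss (t.toList.drop p) : Int) := by
  induction ss generalizing p k with
  | nil => simp [maxPrefixAltGo, pvGreedy]
  | cons a ss ih =>
      have hfind : PySem.Chars.findFrom t.toList [a] (p : Int) none
          = if PySem.Chars.find (t.toList.drop p) [a] = -1 then -1
            else (p : Int) + PySem.Chars.find (t.toList.drop p) [a] :=
        PySem.Chars.findFrom_natCast t.toList [a] p hp
      by_cases hf : PySem.Chars.find (t.toList.drop p) [a] = -1
      · have hmem : a ∉ t.toList.drop p := by
          have := (PySem.Chars.find_eq_neg_one_iff (t.toList.drop p) [a]).mp hf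
          rw [pvSingleton_infix_iff] at this
          exact this
        rw [pvNotMem a ss _ hmem]
        simp [maxPrefixAltGo]
        intro h
        exact absurd (hfind.trans (if_pos hf)) h
      · have hnn : 0 ≤ PySem.Chars.find (t.toList.drop p) [a] := by
          have := PySem.Chars.neg_one_le_find (t.toList.drop p) [a]
          omega
        obtain ⟨j, hfj⟩ : ∃ j : ℕ, PySem.Chars.find (t.toList.drop p) [a] = (j : Int) :=
          ⟨_, (Int.toNat_of_nonneg hnn).symm⟩
        obtain ⟨hpre, hmin⟩ := PySem.Chars.find_spec hnn
        rw [hfj] at hpre hmin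
        simp only [Int.toNat_natCast] at hpre hmin
        have hhd : (t.toList.drop p)[j]? = some a := by
          have h1 := (pvSingleton_prefix_iff a _).mp hpre
          rwa [pvHead?Drop] at h1
        have hjlt : j < (t.toList.drop p).length := by
          rcases List.getElem?_eq_some_iff.mp hhd with ⟨h, _⟩
          exact h
        have hlen : p + j < t.toList.length := by
          rw [List.length_drop] at hjlt
          omega
        have hmin' : ∀ i, i < j → (t.toList.drop p)[i]? ≠ some a := by
          intro i hi h
          exact hmin i hi ((pvSingleton_prefix_iff a _).mpr (by rwa [pvHead?Drop]))
        have hskip := pvSkip a ss j _ hmin' hhd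
        have hdd : (t.toList.drop p).drop (j + 1) = t.toList.drop (p + j + 1) := by
          rw [List.drop_drop]
          congr 1
        rw [hdd] at hskip
        have hidx : PySem.Str.findFrom t (String.ofList [a]) (p : Int) none
            = (p : Int) + (j : Int) := by
          rw [PySem.Str.findFrom_eq]
          simp only [String.toList_ofList]
          rw [hfind, if_neg hf, hfj]
        have hgo : maxPrefixAltGo t (a :: ss) (p : Int) (k : Int)
            = maxPrefixAltGo t ss ((p + j + 1 : Nat) : Int) ((k + 1 : Nat) : Int) := by
          simp only [maxPrefixAltGo, hidx]
          rw [if_neg (by omega : ¬ ((p : Int) + (j : Int) = -1))]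
          norm_cast
        rw [hgo, ih (p + j + 1) (k + 1) (by omega), hskip]
        push_cast
        ring

-- ===== VERDICT (by name: the statement is the Claim_ definition above) =====
theorem maxPrefix_spec : Claim_equal_maxPrefix := by
  intro s t _
  show maxPrefix s t = maxPrefix_alt s t
  have hA := pvFoldA s t 0 0 (Nat.zero_le _) (Nat.zero_le _)
  have hB := pvGoB t s.toList 0 0 (Nat.zero_le _)
  simp only [Nat.cast_zero, List.drop_zero, zero_add] at hA hB
  unfold maxPrefix maxPrefix_alt
  rw [show ((0 : Int) = ((0 : Nat) : Int)) from rfl] at hA ⊢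
  simpa [pvStepA] using hA.trans hB.symm
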